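-- pv_equiv track=rewrite | github.com/VeredasCA/TFM-Bioinformatica | SCRIPT_HOTSPOTS.py | hotspots_read
-- ===== SOURCE A (Python) =====
-- def hotspots_read (read, sequence, exons, pos_init):
--     len_seq = len(sequence)
--     pos = []
--     in_exons = []
--     in_introns = []
--     for r in read:
--         seq = read[r]
--         for i in range(len(seq) - len_seq + 1):
--             if seq[i:i+len_seq] == sequence:
--                 for j in range(len_seq):
--                     pos.append(i+j+pos_init)
--         for h in pos:
--             if h in exons:
--                 in_exons.append(h)
--             else:
--                 in_introns.append(h)
--     return in_exons, in_introns
-- ===== SOURCE B (Python) =====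
-- def _rk_occurrences(seq, pat):
--     """Starting indices of (possibly overlapping) occurrences of pat in seq,
--     by Rabin-Karp rolling hash; hash hits are verified, so the result is exact."""
--     m, n = len(pat), len(seq)
--     if m == 0 or m > n:
--         return []
--     B, P = 256, 1000003
--     pow_m = pow(B, m - 1, P)
--     hp = 0
--     for c in pat:
--         hp = (hp * B + ord(c)) % P
--     hw = 0
--     for c in seq[:m]:
--         hw = (hw * B + ord(c)) % P
--     out = []
--     i = 0
--     for c_out, c_in in zip(seq, seq[m:]):
--         if hw == hp and seq[i:i+m] == pat:
--             out.append(i)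
--         hw = ((hw - ord(c_out) * pow_m) * B + ord(c_in)) % P
--         i += 1
--     if hw == hp and seq[i:] == pat:
--         out.append(i)
--     return out
--
--
-- def hotspots_read(read, sequence, exons, pos_init):
--     m = len(sequence)
--     exon_set = set(exons)
--     in_exons, in_introns = [], []
--     for seq in read.values():
--         for f in _rk_occurrences(seq, sequence):
--             for j in range(m):
--                 h = f + j + pos_init
--                 if h in exon_set:
--                     in_exons.append(h)
--                 else:
--                     in_introns.append(h)
--     return in_exons, in_introns
-- ===== Notes on version B (the rewrite author's own statement) =====
-- stated objective: alternative
-- what changed: B locates occurrences with a Rabin-Karp rolling hash (hash hits verified, so exact) instead of A's slice-and-compare at every index, and classifies each matched position exactly once against a set built from exons in a single pass, instead of A's re-scan of the whole accumulated position list against the exon list after every read.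
-- intended difference: When the sequence occurs in the value of a non-last key of read, A re-classifies the positions accumulated from earlier reads once per later read and returns them duplicated (leftover loop state: pos is never cleared between reads), while B reports each matched position exactly once, which is the intended hotspot listing. — e.g. on hotspots_read([("a", "xx"), ("b", "")], "x", [], 0): A returns ([], [0, 1, 0, 1]), B returns ([], [0, 1])
import Mathlib
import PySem

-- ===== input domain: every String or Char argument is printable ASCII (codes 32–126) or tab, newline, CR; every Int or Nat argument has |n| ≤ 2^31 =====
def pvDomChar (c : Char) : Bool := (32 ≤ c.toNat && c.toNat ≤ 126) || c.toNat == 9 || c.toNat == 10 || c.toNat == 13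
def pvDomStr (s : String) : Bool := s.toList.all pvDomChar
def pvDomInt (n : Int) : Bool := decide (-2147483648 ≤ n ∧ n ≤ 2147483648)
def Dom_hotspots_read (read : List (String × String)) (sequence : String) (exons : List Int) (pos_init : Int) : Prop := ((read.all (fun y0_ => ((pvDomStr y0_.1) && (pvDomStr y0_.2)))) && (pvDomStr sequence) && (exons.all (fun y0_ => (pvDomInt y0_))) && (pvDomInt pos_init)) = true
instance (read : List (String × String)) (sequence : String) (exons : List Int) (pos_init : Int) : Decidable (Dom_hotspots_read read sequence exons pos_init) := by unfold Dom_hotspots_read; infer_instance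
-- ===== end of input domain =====

-- B locates occurrences with a Rabin-Karp rolling hash (verified on hash hits, so exact)
-- instead of A's slice-and-compare at every index, and classifies each matched position
-- exactly once against a set built from exons, in one pass over the reads.

-- ===== PORT A =====
-- 'read' is a Python dict, modelled as its item list: iterate its keys, look each key up.
def hotspots_read (read : List (String × String)) (sequence : String) (exons : List Int) (pos_init : Int) : List Int × List Int :=
  let d := PySem.Dict.ofList read
  let lenSeq : Int := PySem.Str.len sequence
  let fin := d.keys.foldl (fun (st : List Int × List Int × List Int) r =>
    let seq := d.getD r ""
    let pos := (PySem.List.pyRange 0 (PySem.Str.len seq - lenSeq + 1) 1).foldl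
      (fun pos i =>
        if PySem.Str.slice seq (some i) (some (i + lenSeq)) = sequence then
          (PySem.List.pyRange 0 lenSeq 1).foldl (fun pos j => pos ++ [i + j + pos_init]) pos
        else pos) st.1
    let cls := pos.foldl (fun (q : List Int × List Int) h =>
        if h ∈ exons then (q.1 ++ [h], q.2) else (q.1, q.2 ++ [h])) (st.2.1, st.2.2)
    (pos, cls.1, cls.2)) ([], [], [])
  (fin.2.1, fin.2.2)

-- ===== PORT B =====
-- Source B's `_rk_occurrences`: Rabin-Karp with base 256, modulus 1000003; the rolling
-- update runs over zip(seq, seq[m:]) with an explicit index counter, the final window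
-- is checked after the loop.  `pvRkStep` is the body of that loop.
def pvRkStep (seq pat : String) (hp powm : Int) (st : Int × Int × List Int) (cc : Char × Char) : Int × Int × List Int :=
  let out := if st.1 = hp ∧ PySem.Str.slice seq (some st.2.1) (some (st.2.1 + PySem.Str.len pat)) = pat
             then st.2.2 ++ [st.2.1] else st.2.2
  (PySem.Int.mod ((st.1 - ((cc.1.toNat : Int)) * powm) * 256 + ((cc.2.toNat : Int))) 1000003, st.2.1 + 1, out)

def pvRkOcc (seq pat : String) : List Int :=
  let m : Int := PySem.Str.len pat
  let n : Int := PySem.Str.len seq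
  if m = 0 ∨ n < m then []
  else
    -- pow(256, m-1, 1000003): same value, computed directly
    let powm : Int := PySem.Int.mod (256 ^ (m - 1).toNat) 1000003
    let hp : Int := pat.toList.foldl (fun h c => PySem.Int.mod (h * 256 + (c.toNat : Int)) 1000003) 0
    let hw : Int := (PySem.Str.slice seq none (some m)).toList.foldl (fun h c => PySem.Int.mod (h * 256 + (c.toNat : Int)) 1000003) 0
    let st := (seq.toList.zip (PySem.Str.slice seq (some m) none).toList).foldl
      (pvRkStep seq pat hp powm) (hw, 0, [])
    if st.1 = hp ∧ PySem.Str.slice seq (some st.2.1) none = pat then st.2.2 ++ [st.2.1] else st.2.2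

def hotspots_read_alt (read : List (String × String)) (sequence : String) (exons : List Int) (pos_init : Int) : List Int × List Int :=
  let m : Int := PySem.Str.len sequence
  let exonSet := PySem.Set.ofList exons
  let d := PySem.Dict.ofList read
  d.values.foldl (fun (acc : List Int × List Int) seq =>
    (pvRkOcc seq sequence).foldl (fun acc f =>
      (PySem.List.pyRange 0 m 1).foldl (fun (acc : List Int × List Int) j =>
        let h := f + j + pos_init
        if h ∈ exonSet then (acc.1 ++ [h], acc.2) else (acc.1, acc.2 ++ [h])) acc) acc)
    ([], [])

-- ===== PRECONDITION & SPEC =====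
-- When the sequence occurs in the value of a non-last key of read, A re-classifies the
-- positions accumulated from earlier reads once per later read and returns them duplicated
-- (leftover loop state: pos is never cleared between reads), while B reports each matched
-- position exactly once, which is the intended hotspot listing.
def D_hotspots_read (read : List (String × String)) (sequence : String) (exons : List Int) (pos_init : Int) : Prop :=
  sequence ≠ "" ∧ ∃ v ∈ (PySem.Dict.ofList read).values.dropLast, sequence.toList <:+: v.toList
instance (read : List (String × String)) (sequence : String) (exons : List Int) (pos_init : Int) : Decidable (D_hotspots_read read sequence exons pos_init) := by unfold D_hotspots_read; infer_instance

def Spec_hotspots_read (read : List (String × String)) (sequence : String) (exons : List Int) (pos_init : Int) (out : List Int × List Int) : Prop := ¬ D_hotspots_read read sequence exons pos_init → out = hotspots_read_alt read sequence exons pos_init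
instance (read : List (String × String)) (sequence : String) (exons : List Int) (pos_init : Int) (out : List Int × List Int) : Decidable (Spec_hotspots_read read sequence exons pos_init out) := by unfold Spec_hotspots_read; infer_instance

def pvDiffWitness_hotspots_read : (List (String × String)) × String × List Int × Int :=
  ([("a", "xx"), ("b", "")], "x", [], 0)
def pvDiffWitnessOut_hotspots_read : (List Int × List Int) × (List Int × List Int) :=
  (([], [0, 1, 0, 1]), ([], [0, 1]))

-- ===== CLAIM (what is proved, stated in full; the proofs are below) =====
def Claim_unchanged_hotspots_read : Prop := ∀ (read : List (String × String)) (sequence : String) (exons : List Int) (pos_init : Int), Dom_hotspots_read read sequence exons pos_init → Spec_hotspots_read read sequence exons pos_init (hotspots_read read sequence exons pos_init)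
def Claim_changed_hotspots_read : Prop := Dom_hotspots_read (pvDiffWitness_hotspots_read.1) (pvDiffWitness_hotspots_read.2.1) (pvDiffWitness_hotspots_read.2.2.1) (pvDiffWitness_hotspots_read.2.2.2) ∧ D_hotspots_read (pvDiffWitness_hotspots_read.1) (pvDiffWitness_hotspots_read.2.1) (pvDiffWitness_hotspots_read.2.2.1) (pvDiffWitness_hotspots_read.2.2.2) ∧ hotspots_read (pvDiffWitness_hotspots_read.1) (pvDiffWitness_hotspots_read.2.1) (pvDiffWitness_hotspots_read.2.2.1) (pvDiffWitness_hotspots_read.2.2.2) = pvDiffWitnessOut_hotspots_read.1 ∧ hotspots_read_alt (pvDiffWitness_hotspots_read.1) (pvDiffWitness_hotspots_read.2.1) (pvDiffWitness_hotspots_read.2.2.1) (pvDiffWitness_hotspots_read.2.2.2) = pvDiffWitnessOut_hotspots_read.2 ∧ pvDiffWitnessOut_hotspots_read.1 ≠ pvDiffWitnessOut_hotspots_read.2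
def Claim_exact_hotspots_read : Prop := ∀ (read : List (String × String)) (sequence : String) (exons : List Int) (pos_init : Int), Dom_hotspots_read read sequence exons pos_init → D_hotspots_read read sequence exons pos_init → hotspots_read read sequence exons pos_init ≠ hotspots_read_alt read sequence exons pos_init

-- ===== LEMMAS AND PROOFS =====

-- ---------- generic fold shapes ----------

-- appending one element per loop turn is the map
theorem pv_foldl_app {α : Type} (l : List α) (g : α → Int) :
    ∀ pos : List Int, l.foldl (fun pos j => pos ++ [g j]) pos = pos ++ l.map g := by
  induction l with
  | nil => intro pos; simp
  | cons x t ih => intro pos; rw [List.foldl_cons, ih]; simp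

-- A's nested match loop appends exactly the filter+flatMap block
theorem pv_match_fold (R S : List Int) (c : Int → Prop) [DecidablePred c] (g : Int → Int → Int) :
    ∀ pos : List Int,
      R.foldl (fun pos i => if c i then S.foldl (fun pos j => pos ++ [g i j]) pos else pos) pos
        = pos ++ (R.filter (fun i => decide (c i))).flatMap (fun i => S.map (g i)) := by
  induction R with
  | nil => intro pos; simp
  | cons x t ih =>
    intro pos
    rw [List.foldl_cons]
    by_cases hx : c x
    · rw [if_pos hx, pv_foldl_app, ih]
      simp [hx]
    · rw [if_neg hx, ih]
      simp [hx]

-- classifying a list from q appends the two filters to q's components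
theorem pv_classify_fold (p : Int → Prop) [DecidablePred p] :
    ∀ (l : List Int) (q : List Int × List Int),
      l.foldl (fun (q : List Int × List Int) h =>
          if p h then (q.1 ++ [h], q.2) else (q.1, q.2 ++ [h])) q
        = (q.1 ++ l.filter (fun h => decide (p h)), q.2 ++ l.filter (fun h => !decide (p h))) := by
  intro l
  induction l with
  | nil => intro q; simp
  | cons x t ih =>
    intro q
    rw [List.foldl_cons, ih]
    by_cases hx : p x <;> simp [hx]

-- a nest of folds is a fold over the flatMap
theorem pv_foldl_flatMap {α β γ : Type} (L : List α) (g : α → List β) (step : γ → β → γ) :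
    ∀ a : γ, L.foldl (fun a x => (g x).foldl step a) a = (L.flatMap g).foldl step a := by
  induction L with
  | nil => intro a; simp
  | cons x t ih => intro a; rw [List.foldl_cons, List.flatMap_cons, List.foldl_append, ih]

-- ---------- slices and windows ----------

-- the slice comparison at a natural index IS 'pattern is a prefix of the drop'
theorem pv_slice_iff (seq sequence : String) (i : Nat) :
    PySem.Str.slice seq (some (i : Int)) (some ((i : Int) + PySem.Str.len sequence)) = sequence
      ↔ sequence.toList <+: seq.toList.drop i := by
  rw [← String.toList_inj, PySem.Str.toList_slice, PySem.Chars.slice_eq_listSlice,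
      PySem.Str.len_eq, PySem.List.slice_natCast_add, List.prefix_iff_eq_take]
  exact ⟨fun h => h.symm, fun h => h.symm⟩

-- a prefix of a later drop is an infix of an earlier drop
theorem pv_infix_of_prefix_drop {sub l : List Char} {k i : Nat} (hk : k ≤ i)
    (h : sub <+: l.drop i) : sub <:+: l.drop k := by
  have hdrop : (l.drop k).drop (i - k) = l.drop i := by
    rw [List.drop_drop]; congr 1; omega
  obtain ⟨t, ht⟩ := hdrop ▸ h
  exact ⟨(l.drop k).take (i - k), t, by rw [List.append_assoc, ht, List.take_append_drop]⟩

-- slice at i of width m equals pat  ↔  the m-window at i equals pat's chars (when the window is full)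
theorem pv_slice_window (seq pat : String) (k : Nat) (hk : k + pat.toList.length ≤ seq.toList.length) :
    (PySem.Str.slice seq (some (k : Int)) (some ((k : Int) + PySem.Str.len pat)) = pat)
      ↔ (seq.toList.drop k).take pat.toList.length = pat.toList := by
  rw [pv_slice_iff, List.prefix_iff_eq_take]
  constructor
  · intro h; exact h.symm
  · intro h; exact h.symm

-- ---------- the rolling hash ----------

def pvV (s : List Char) : Int := s.foldl (fun h c => h * 256 + (c.toNat : Int)) 0

theorem pv_modeq (a : Int) : a % 1000003 ≡ a [ZMOD 1000003] :=
  Int.emod_emod_of_dvd a dvd_rfl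

theorem pv_hash_mod (s : List Char) :
    ∀ a : Int, s.foldl (fun h c => PySem.Int.mod (h * 256 + (c.toNat : Int)) 1000003) (a % 1000003)
      = (s.foldl (fun h c => h * 256 + (c.toNat : Int)) a) % 1000003 := by
  induction s with
  | nil => intro a; simp
  | cons c t ih =>
    intro a
    rw [List.foldl_cons, List.foldl_cons]
    have hm : PySem.Int.mod ((a % 1000003) * 256 + (c.toNat : Int)) 1000003
        = (a * 256 + (c.toNat : Int)) % 1000003 := by
      rw [PySem.Int.mod_eq_emod_of_pos (by norm_num)]
      exact (((pv_modeq a).mul_right 256).add_right _)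
    rw [hm, ih]

theorem pv_hash_eq (s : List Char) :
    s.foldl (fun h c => PySem.Int.mod (h * 256 + (c.toNat : Int)) 1000003) 0 = pvV s % 1000003 := by
  have := pv_hash_mod s 0
  simpa [pvV] using this

theorem pv_V_general (w : List Char) :
    ∀ a : Int, w.foldl (fun h c => h * 256 + (c.toNat : Int)) a = a * 256 ^ w.length + pvV w := by
  induction w with
  | nil => intro a; simp [pvV]
  | cons c t ih =>
    intro a
    rw [List.foldl_cons, ih]
    have hv : pvV (c :: t) = (c.toNat : Int) * 256 ^ t.length + pvV t := by
      show List.foldl _ (0 * 256 + (c.toNat : Int)) t = _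
      rw [ih]; ring_nf
    rw [hv]
    simp [List.length_cons]
    ring

theorem pv_V_cons (c : Char) (t : List Char) :
    pvV (c :: t) = (c.toNat : Int) * 256 ^ t.length + pvV t := by
  show List.foldl _ (0 * 256 + (c.toNat : Int)) t = _
  rw [pv_V_general]; ring_nf

theorem pv_V_snoc (w : List Char) (d : Char) :
    pvV (w ++ [d]) = pvV w * 256 + (d.toNat : Int) := by
  simp [pvV, List.foldl_append]

-- the rolling update sends the hash of window (c :: rest) to the hash of (rest ++ [d])
theorem pv_roll (c d : Char) (rest : List Char) :
    PySem.Int.mod ((pvV (c :: rest) % 1000003 - (c.toNat : Int) * PySem.Int.mod (256 ^ rest.length) 1000003) * 256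
        + (d.toNat : Int)) 1000003
      = pvV (rest ++ [d]) % 1000003 := by
  rw [PySem.Int.mod_eq_emod_of_pos (by norm_num), PySem.Int.mod_eq_emod_of_pos (by norm_num)]
  have h1 : pvV (c :: rest) % 1000003 ≡ pvV (c :: rest) [ZMOD 1000003] := pv_modeq _
  have h2 : (c.toNat : Int) * (256 ^ rest.length % 1000003) ≡ (c.toNat : Int) * 256 ^ rest.length [ZMOD 1000003] :=
    (pv_modeq _).mul_left _
  have h3 := (((h1.sub h2).mul_right 256).add_right ((d.toNat : Int)))
  have h4 : (pvV (c :: rest) - (c.toNat : Int) * 256 ^ rest.length) * 256 + (d.toNat : Int)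
      = pvV (rest ++ [d]) := by
    rw [pv_V_cons, pv_V_snoc]; ring
  calc ((pvV (c :: rest) % 1000003 - (c.toNat : Int) * (256 ^ rest.length % 1000003)) * 256 + (d.toNat : Int)) % 1000003
      = ((pvV (c :: rest) - (c.toNat : Int) * 256 ^ rest.length) * 256 + (d.toNat : Int)) % 1000003 := h3
    _ = pvV (rest ++ [d]) % 1000003 := by rw [h4]

-- ---------- the Rabin-Karp scan returns the naive match starts ----------

-- loop invariant: starting at offset k with the hash of the k-th window, the zip fold
-- ends in the last window's state and appends exactly the match starts in [k, n-m)
-- loop invariant: starting at offset k with the hash of the k-th window, the zip fold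
-- ends in the last window's state and appends exactly the match starts in [k, n-m)
theorem pv_rk_loop (seq pat : String) (hm1 : 1 ≤ pat.toList.length)
    (hmn : pat.toList.length ≤ seq.toList.length) :
    ∀ (dd k : Nat), k + dd = seq.toList.length - pat.toList.length → ∀ out : List Int,
      ((seq.toList.drop k).zip (seq.toList.drop (k + pat.toList.length))).foldl
          (pvRkStep seq pat (pvV pat.toList % 1000003)
            (PySem.Int.mod (256 ^ (PySem.Str.len pat - 1).toNat) 1000003))
          (pvV ((seq.toList.drop k).take pat.toList.length) % 1000003, (k : Int), out)
        = (pvV ((seq.toList.drop (seq.toList.length - pat.toList.length)).take pat.toList.length) % 1000003,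
           ((seq.toList.length - pat.toList.length : Nat) : Int),
           out ++ (PySem.List.pyRange (k : Int) ((seq.toList.length : Int) - (pat.toList.length : Int)) 1).filter
              (fun i => decide (PySem.Str.slice seq (some i) (some (i + PySem.Str.len pat)) = pat))) := by
  have hlen : PySem.Str.len pat = (pat.toList.length : Int) := by
    simp [PySem.Str.len_eq]
  intro dd
  induction dd with
  | zero =>
    intro k hk out
    have hk' : k = seq.toList.length - pat.toList.length := by omega
    subst hk'
    have hnil : seq.toList.drop (seq.toList.length - pat.toList.length + pat.toList.length) = [] :=
      List.drop_eq_nil_of_le (by omega)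
    rw [hnil, List.zip_nil_right, List.foldl_nil,
        PySem.List.pyRange_one_eq_nil (by push_cast [Nat.cast_sub hmn]; omega), List.filter_nil,
        List.append_nil]
  | succ dd ih =>
    intro k hk out
    have hkn : k < seq.toList.length - pat.toList.length := by omega
    obtain ⟨mm, hmm⟩ : ∃ mm, pat.toList.length = mm + 1 := ⟨pat.toList.length - 1, by omega⟩
    have h1 : seq.toList.drop k = seq.toList[k] :: seq.toList.drop (k + 1) :=
      List.drop_eq_getElem_cons (by omega)
    have h2 : seq.toList.drop (k + pat.toList.length)
        = seq.toList[k + pat.toList.length] :: seq.toList.drop (k + 1 + pat.toList.length) := by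
      rw [List.drop_eq_getElem_cons (by omega)]
      congr 2
      omega
    have hzip : (seq.toList.drop k).zip (seq.toList.drop (k + pat.toList.length))
        = (seq.toList[k], seq.toList[k + pat.toList.length])
            :: (seq.toList.drop (k + 1)).zip (seq.toList.drop (k + 1 + pat.toList.length)) := by
      rw [h1, h2, List.zip_cons_cons]
    -- window decompositions
    have hrestlen : ((seq.toList.drop (k + 1)).take mm).length = mm := by
      rw [List.length_take, List.length_drop]
      omega
    have hwin1 : (seq.toList.drop k).take pat.toList.length
        = seq.toList[k] :: (seq.toList.drop (k + 1)).take mm := by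
      rw [h1, hmm, List.take_succ_cons]
    have hwin2 : (seq.toList.drop (k + 1)).take pat.toList.length
        = (seq.toList.drop (k + 1)).take mm ++ [seq.toList[k + pat.toList.length]] := by
      conv_lhs => rw [hmm]
      rw [List.take_succ]
      congr 1
      rw [List.getElem?_drop, List.getElem?_eq_getElem (by omega)]
      simp only [Option.toList_some]
      congr 2
      omega
    have hpow : (PySem.Str.len pat - 1).toNat = mm := by
      rw [hlen]; omega
    -- one step of the loop
    have hstep : pvRkStep seq pat (pvV pat.toList % 1000003)
          (PySem.Int.mod (256 ^ (PySem.Str.len pat - 1).toNat) 1000003)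
          (pvV ((seq.toList.drop k).take pat.toList.length) % 1000003, (k : Int), out)
          (seq.toList[k], seq.toList[k + pat.toList.length])
        = (pvV ((seq.toList.drop (k + 1)).take pat.toList.length) % 1000003, ((k + 1 : Nat) : Int),
           out ++ if PySem.Str.slice seq (some (k : Int)) (some ((k : Int) + PySem.Str.len pat)) = pat
                  then [(k : Int)] else []) := by
      simp only [pvRkStep]
      have hhash : PySem.Int.mod
            ((pvV ((seq.toList.drop k).take pat.toList.length) % 1000003
              - ((seq.toList[k].toNat : Int)) * PySem.Int.mod (256 ^ (PySem.Str.len pat - 1).toNat) 1000003) * 256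
              + ((seq.toList[k + pat.toList.length].toNat : Int))) 1000003
          = pvV ((seq.toList.drop (k + 1)).take pat.toList.length) % 1000003 := by
        rw [hwin1, hwin2, hpow]
        have hroll := pv_roll seq.toList[k] seq.toList[k + pat.toList.length]
          ((seq.toList.drop (k + 1)).take mm)
        rw [hrestlen] at hroll
        exact hroll
      by_cases hsl : PySem.Str.slice seq (some (k : Int)) (some ((k : Int) + PySem.Str.len pat)) = pat
      · have hwp : (seq.toList.drop k).take pat.toList.length = pat.toList :=
          (pv_slice_window seq pat k (by omega)).mp hsl
        rw [if_pos ⟨by rw [hwp], hsl⟩, if_pos hsl]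
        simp only [Prod.mk.injEq]
        exact ⟨hhash, by push_cast; ring, trivial⟩
      · rw [if_neg (fun hc => hsl hc.2), if_neg hsl]
        simp only [Prod.mk.injEq]
        exact ⟨hhash, by push_cast; ring, by simp⟩
    rw [hzip, List.foldl_cons, hstep, ih (k + 1) (by omega)]
    have hsplit : PySem.List.pyRange (k : Int) ((seq.toList.length : Int) - (pat.toList.length : Int)) 1
        = (k : Int) :: PySem.List.pyRange ((k : Int) + 1) ((seq.toList.length : Int) - (pat.toList.length : Int)) 1 :=
      PySem.List.pyRange_one_cons (by omega)
    rw [hsplit, List.filter_cons]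
    have hcast : ((k + 1 : Nat) : Int) = (k : Int) + 1 := by push_cast; ring
    rw [hcast]
    simp only [List.append_assoc, List.cons_append, List.nil_append]
    congr 1
    split_ifs <;> simp_all

-- the whole scan equals the naive filtered index range (nonempty pattern)
theorem pv_rk_eq (seq pat : String) (hpat : pat ≠ "") :
    pvRkOcc seq pat
      = (PySem.List.pyRange 0 (PySem.Str.len seq - PySem.Str.len pat + 1) 1).filter
          (fun i => decide (PySem.Str.slice seq (some i) (some (i + PySem.Str.len pat)) = pat)) := by
  have hlen : PySem.Str.len pat = (pat.toList.length : Int) := by simp [PySem.Str.len_eq]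
  have hlens : PySem.Str.len seq = (seq.toList.length : Int) := by simp [PySem.Str.len_eq]
  have hm1 : 1 ≤ pat.toList.length := by
    rcases Nat.eq_zero_or_pos pat.toList.length with h | h
    · exact absurd (String.toList_inj.mp (by simpa using List.length_eq_zero_iff.mp h)) hpat
    · exact h
  rw [pvRkOcc]
  by_cases hg : PySem.Str.len pat = 0 ∨ PySem.Str.len seq < PySem.Str.len pat
  · rcases hg with h | h
    · rw [hlen] at h; omega
    · rw [if_pos (Or.inr h)]
      rw [PySem.List.pyRange_one_eq_nil (by omega), List.filter_nil]
  · rw [if_neg hg]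
    push_neg at hg
    have hmn : pat.toList.length ≤ seq.toList.length := by
      have := hg.2; rw [hlen, hlens] at this; exact_mod_cast this
    simp only
    have hstep0 := pv_rk_loop seq pat hm1 hmn (seq.toList.length - pat.toList.length) 0 (by omega) []
    have hslice_to : (PySem.Str.slice seq none (some (PySem.Str.len pat))).toList
        = seq.toList.take pat.toList.length := by
      rw [PySem.Str.toList_slice, PySem.Chars.slice_eq_listSlice, PySem.List.slice_to _ (by rw [hlen]; omega)]
      rw [hlen]
      simp
    have hslice_from : (PySem.Str.slice seq (some (PySem.Str.len pat)) none).toList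
        = seq.toList.drop pat.toList.length := by
      rw [PySem.Str.toList_slice, PySem.Chars.slice_eq_listSlice, PySem.List.slice_from _ (by rw [hlen]; omega)]
      rw [hlen]
      simp
    simp only [List.drop_zero, Nat.zero_add, Nat.cast_zero] at hstep0
    rw [hslice_to, hslice_from]
    simp only [pv_hash_eq]
    rw [hlen] at hstep0
    rw [hlens, hlen]
    rw [hstep0]
    have hnm : ((seq.toList.length - pat.toList.length : Nat) : Int)
        = (seq.toList.length : Int) - (pat.toList.length : Int) := by omega
    have hwfull : (seq.toList.drop (seq.toList.length - pat.toList.length)).take pat.toList.length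
        = seq.toList.drop (seq.toList.length - pat.toList.length) :=
      List.take_of_length_le (by rw [List.length_drop]; omega)
    have hfin : PySem.Str.slice seq (some ((seq.toList.length - pat.toList.length : Nat) : Int)) none = pat
        ↔ seq.toList.drop (seq.toList.length - pat.toList.length) = pat.toList := by
      rw [← String.toList_inj, PySem.Str.toList_slice, PySem.Chars.slice_eq_listSlice,
          PySem.List.slice_from_natCast]
    have hpred : PySem.Str.slice seq (some ((seq.toList.length - pat.toList.length : Nat) : Int))
          (some (((seq.toList.length - pat.toList.length : Nat) : Int) + PySem.Str.len pat)) = pat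
        ↔ seq.toList.drop (seq.toList.length - pat.toList.length) = pat.toList := by
      rw [pv_slice_window seq pat _ (by omega), hwfull]
    rw [PySem.List.pyRange_one_succ_right (by omega), List.filter_append]
    rw [← hnm]
    by_cases hd : seq.toList.drop (seq.toList.length - pat.toList.length) = pat.toList
    · rw [if_pos ⟨by rw [hwfull, hd], hfin.mpr hd⟩]
      have hpt : PySem.Str.slice seq (some ((seq.toList.length - pat.toList.length : Nat) : Int))
          (some (((seq.toList.length - pat.toList.length : Nat) : Int) + PySem.Str.len pat)) = pat :=
        hpred.mpr hd
      rw [hlen] at hpt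
      simp_all [List.filter_singleton]
    · rw [if_neg (fun hc => hd (hfin.mp hc.2))]
      have hnp : ¬ PySem.Str.slice seq (some ((seq.toList.length - pat.toList.length : Nat) : Int))
          (some (((seq.toList.length - pat.toList.length : Nat) : Int) + PySem.Str.len pat)) = pat :=
        fun hc => hd (hpred.mp hc)
      rw [hlen] at hnp
      simp_all [List.filter_singleton]

-- ---------- the per-read block of positions ----------

def pvE (sequence : String) (pos_init : Int) (seq : String) : List Int :=
  ((PySem.List.pyRange 0 (PySem.Str.len seq - PySem.Str.len sequence + 1) 1).filter
      (fun i => decide (PySem.Str.slice seq (some i) (some (i + PySem.Str.len sequence)) = sequence))).flatMap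
    (fun i => (PySem.List.pyRange 0 (PySem.Str.len sequence) 1).map (fun j => i + j + pos_init))

theorem pv_expand (sequence : String) (pos_init : Int) (seq : String) :
    (pvRkOcc seq sequence).flatMap
        (fun f => (PySem.List.pyRange 0 (PySem.Str.len sequence) 1).map (fun j => f + j + pos_init))
      = pvE sequence pos_init seq := by
  by_cases h0 : sequence = ""
  · subst h0
    simp [pvRkOcc, pvE, PySem.Str.len_eq, List.flatMap]
  · rw [pvE, pv_rk_eq seq sequence h0]

theorem pv_E_empty_pat (pos_init : Int) (seq : String) : pvE "" pos_init seq = [] := by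
  simp [pvE, PySem.Str.len_eq, List.flatMap]

theorem pv_E_no_infix (sequence : String) (pos_init : Int) (seq : String)
    (h : ¬ sequence.toList <:+: seq.toList) : pvE sequence pos_init seq = [] := by
  have hfil : (PySem.List.pyRange 0 (PySem.Str.len seq - PySem.Str.len sequence + 1) 1).filter
      (fun i => decide (PySem.Str.slice seq (some i) (some (i + PySem.Str.len sequence)) = sequence)) = [] := by
    rw [List.filter_eq_nil_iff]
    intro a ha hdec
    have hmem := (PySem.List.mem_pyRange_one).mp ha
    have ha0 : a = ((a.toNat : Nat) : Int) := by omega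
    rw [ha0] at hdec
    have hpre : sequence.toList <+: seq.toList.drop a.toNat :=
      (pv_slice_iff seq sequence a.toNat).mp (by simpa using hdec)
    exact h (by simpa using pv_infix_of_prefix_drop (Nat.zero_le _) hpre)
  rw [pvE, hfil]; rfl

-- ---------- the main loops ----------

def pvAStep (sequence : String) (exons : List Int) (pos_init : Int)
    (st : List Int × List Int × List Int) (seq : String) : List Int × List Int × List Int :=
  let pos := (PySem.List.pyRange 0 (PySem.Str.len seq - PySem.Str.len sequence + 1) 1).foldl
    (fun pos i =>
      if PySem.Str.slice seq (some i) (some (i + PySem.Str.len sequence)) = sequence then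
        (PySem.List.pyRange 0 (PySem.Str.len sequence) 1).foldl (fun pos j => pos ++ [i + j + pos_init]) pos
      else pos) st.1
  let cls := pos.foldl (fun (q : List Int × List Int) h =>
      if h ∈ exons then (q.1 ++ [h], q.2) else (q.1, q.2 ++ [h])) (st.2.1, st.2.2)
  (pos, cls.1, cls.2)

def pvBStep (sequence : String) (exons : List Int) (pos_init : Int)
    (acc : List Int × List Int) (seq : String) : List Int × List Int :=
  (pvRkOcc seq sequence).foldl (fun acc f =>
    (PySem.List.pyRange 0 (PySem.Str.len sequence) 1).foldl (fun (acc : List Int × List Int) j =>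
      let h := f + j + pos_init
      if h ∈ PySem.Set.ofList exons then (acc.1 ++ [h], acc.2) else (acc.1, acc.2 ++ [h])) acc) acc

theorem pv_AStep_eq (sequence : String) (exons : List Int) (pos_init : Int)
    (pos e i : List Int) (v : String) :
    pvAStep sequence exons pos_init (pos, e, i) v
      = (pos ++ pvE sequence pos_init v,
         e ++ (pos ++ pvE sequence pos_init v).filter (fun h => decide (h ∈ exons)),
         i ++ (pos ++ pvE sequence pos_init v).filter (fun h => !decide (h ∈ exons))) := by
  simp only [pvAStep]
  rw [pv_match_fold (PySem.List.pyRange 0 (PySem.Str.len v - PySem.Str.len sequence + 1) 1)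
        (PySem.List.pyRange 0 (PySem.Str.len sequence) 1)
        (fun i => PySem.Str.slice v (some i) (some (i + PySem.Str.len sequence)) = sequence)
        (fun i j => i + j + pos_init) pos,
      pv_classify_fold (fun h => h ∈ exons)]
  simp [pvE]

theorem pv_AStep_nil (sequence : String) (exons : List Int) (pos_init : Int)
    (e i : List Int) (v : String) :
    pvAStep sequence exons pos_init ([], e, i) v
      = (pvE sequence pos_init v,
         e ++ (pvE sequence pos_init v).filter (fun h => decide (h ∈ exons)),
         i ++ (pvE sequence pos_init v).filter (fun h => !decide (h ∈ exons))) := by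
  rw [pv_AStep_eq]
  simp

theorem pv_BStep_eq (sequence : String) (exons : List Int) (pos_init : Int)
    (acc : List Int × List Int) (v : String) :
    pvBStep sequence exons pos_init acc v
      = (acc.1 ++ (pvE sequence pos_init v).filter (fun h => decide (h ∈ exons)),
         acc.2 ++ (pvE sequence pos_init v).filter (fun h => !decide (h ∈ exons))) := by
  simp only [pvBStep]
  have h1 : ∀ (f : Int) (acc : List Int × List Int),
      (PySem.List.pyRange 0 (PySem.Str.len sequence) 1).foldl (fun (acc : List Int × List Int) j =>
        let h := f + j + pos_init
        if h ∈ PySem.Set.ofList exons then (acc.1 ++ [h], acc.2) else (acc.1, acc.2 ++ [h])) acc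
      = ((PySem.List.pyRange 0 (PySem.Str.len sequence) 1).map (fun j => f + j + pos_init)).foldl
          (fun (acc : List Int × List Int) h =>
            if h ∈ PySem.Set.ofList exons then (acc.1 ++ [h], acc.2) else (acc.1, acc.2 ++ [h])) acc := by
    intro f acc; rw [List.foldl_map]
  simp only [h1]
  rw [pv_foldl_flatMap, pv_expand, pv_classify_fold (fun h => h ∈ PySem.Set.ofList exons)]
  have hfe : (pvE sequence pos_init v).filter (fun h => decide (h ∈ PySem.Set.ofList exons))
      = (pvE sequence pos_init v).filter (fun h => decide (h ∈ exons)) := by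
    apply List.filter_congr; intro a _; simp [PySem.Set.mem_ofList]
  have hfi : (pvE sequence pos_init v).filter (fun h => !decide (h ∈ PySem.Set.ofList exons))
      = (pvE sequence pos_init v).filter (fun h => !decide (h ∈ exons)) := by
    apply List.filter_congr; intro a _; simp [PySem.Set.mem_ofList]
  rw [hfe, hfi]

-- outside the change region A's pos list is empty before the last read, so A's repeated
-- re-classification collapses to B's single classification per read
theorem pv_main (sequence : String) (exons : List Int) (pos_init : Int) :
    ∀ (vals : List String) (e i : List Int),
      (∀ v ∈ vals.dropLast, pvE sequence pos_init v = []) →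
      (vals.foldl (pvAStep sequence exons pos_init) ([], e, i)).2
        = vals.foldl (pvBStep sequence exons pos_init) (e, i) := by
  intro vals
  induction vals with
  | nil => intro e i _; rfl
  | cons v rest ih =>
    intro e i hyp
    rw [List.foldl_cons, List.foldl_cons, pv_AStep_nil, pv_BStep_eq]
    by_cases hr : rest = []
    · subst hr; rfl
    · have hE : pvE sequence pos_init v = [] := by
        refine hyp v ?_
        rw [List.dropLast_cons_of_ne_nil hr]
        exact List.mem_cons_self
      rw [hE]
      simp only [List.filter_nil, List.append_nil]
      exact ih e i (fun w hw => hyp w (by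
        rw [List.dropLast_cons_of_ne_nil hr]
        exact List.mem_cons_of_mem _ hw))
-- ---------- output sizes (for the tightness of D_) ----------

def pvLen2 (q : List Int × List Int) : Nat := q.1.length + q.2.length

def pvSum (sequence : String) (pos_init : Int) (vals : List String) : Nat :=
  (vals.map (fun v => (pvE sequence pos_init v).length)).sum

theorem pv_part (exons : List Int) (l : List Int) :
    (l.filter (fun h => decide (h ∈ exons))).length
      + (l.filter (fun h => !decide (h ∈ exons))).length = l.length :=
  (List.length_eq_length_filter_add _).symm

theorem pv_lenB (sequence : String) (exons : List Int) (pos_init : Int) :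
    ∀ (vals : List String) (e i : List Int),
      pvLen2 (vals.foldl (pvBStep sequence exons pos_init) (e, i))
        = pvLen2 (e, i) + pvSum sequence pos_init vals := by
  intro vals
  induction vals with
  | nil => intro e i; simp [pvSum]
  | cons v rest ih =>
    intro e i
    rw [List.foldl_cons, pv_BStep_eq, ih]
    have hp := pv_part exons (pvE sequence pos_init v)
    simp only [pvLen2, pvSum, List.map_cons, List.sum_cons, List.length_append]
    omega

theorem pv_lenA_ge (sequence : String) (exons : List Int) (pos_init : Int) :
    ∀ (vals : List String) (pos e i : List Int), vals ≠ [] →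
      pvLen2 ((vals.foldl (pvAStep sequence exons pos_init) (pos, e, i)).2)
        ≥ pvLen2 (e, i) + pvSum sequence pos_init vals + pos.length := by
  intro vals
  induction vals with
  | nil => intro pos e i h; exact absurd rfl h
  | cons v rest ih =>
    intro pos e i _
    rw [List.foldl_cons, pv_AStep_eq]
    have hp := pv_part exons (pos ++ pvE sequence pos_init v)
    by_cases hr : rest = []
    · subst hr
      simp only [List.foldl_nil, pvLen2, pvSum, List.map_cons, List.map_nil, List.sum_cons,
        List.sum_nil, List.length_append] at *
      omega
    · have h := ih (pos ++ pvE sequence pos_init v)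
        (e ++ (pos ++ pvE sequence pos_init v).filter (fun h => decide (h ∈ exons)))
        (i ++ (pos ++ pvE sequence pos_init v).filter (fun h => !decide (h ∈ exons))) hr
      simp only [pvLen2, pvSum, List.map_cons, List.sum_cons, List.length_append] at *
      omega

theorem pv_lenA_strict (sequence : String) (exons : List Int) (pos_init : Int) :
    ∀ (vals : List String) (pos e i : List Int),
      (∃ v ∈ vals.dropLast, pvE sequence pos_init v ≠ []) →
      pvLen2 ((vals.foldl (pvAStep sequence exons pos_init) (pos, e, i)).2)
        > pvLen2 (e, i) + pvSum sequence pos_init vals := by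
  intro vals
  induction vals with
  | nil => rintro pos e i ⟨v, hv, -⟩; simp at hv
  | cons v rest ih =>
    rintro pos e i ⟨w, hw, hne⟩
    have hr : rest ≠ [] := by rintro rfl; simp at hw
    rw [List.dropLast_cons_of_ne_nil hr] at hw
    rw [List.foldl_cons, pv_AStep_eq]
    have hp := pv_part exons (pos ++ pvE sequence pos_init v)
    rcases List.mem_cons.mp hw with rfl | hw'
    · have h := pv_lenA_ge sequence exons pos_init rest (pos ++ pvE sequence pos_init w)
        (e ++ (pos ++ pvE sequence pos_init w).filter (fun h => decide (h ∈ exons)))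
        (i ++ (pos ++ pvE sequence pos_init w).filter (fun h => !decide (h ∈ exons))) hr
      have hlen : 0 < (pvE sequence pos_init w).length := List.length_pos_of_ne_nil hne
      simp only [pvLen2, pvSum, List.map_cons, List.sum_cons, List.length_append] at *
      omega
    · have h := ih (pos ++ pvE sequence pos_init v)
        (e ++ (pos ++ pvE sequence pos_init v).filter (fun h => decide (h ∈ exons)))
        (i ++ (pos ++ pvE sequence pos_init v).filter (fun h => !decide (h ∈ exons)))
        ⟨w, hw', hne⟩
      simp only [pvLen2, pvSum, List.map_cons, List.sum_cons, List.length_append] at *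
      omega

-- an actual occurrence makes the per-read block nonempty
theorem pv_E_ne (sequence : String) (pos_init : Int) (v : String) (hs : sequence ≠ "")
    (hinf : sequence.toList <:+: v.toList) : pvE sequence pos_init v ≠ [] := by
  obtain ⟨s, t, hst⟩ := hinf
  have hm1 : 1 ≤ sequence.toList.length := by
    rcases Nat.eq_zero_or_pos sequence.toList.length with h | h
    · exact absurd (String.toList_inj.mp (by simpa using List.length_eq_zero_iff.mp h)) hs
    · exact h
  have hlen : PySem.Str.len sequence = (sequence.toList.length : Int) := by simp [PySem.Str.len_eq]
  have hlenv : PySem.Str.len v = (v.toList.length : Int) := by simp [PySem.Str.len_eq]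
  have hlens : v.toList.length = s.length + sequence.toList.length + t.length := by
    rw [← hst, List.length_append, List.length_append]
  have hpre : sequence.toList <+: v.toList.drop s.length := by
    refine ⟨t, ?_⟩
    rw [← hst, List.append_assoc, List.drop_left]
  have hmem : ((s.length : Nat) : Int) ∈ PySem.List.pyRange 0 (PySem.Str.len v - PySem.Str.len sequence + 1) 1 := by
    rw [PySem.List.mem_pyRange_one, hlen, hlenv]
    omega
  have hdec : decide (PySem.Str.slice v (some ((s.length : Nat) : Int))
      (some (((s.length : Nat) : Int) + PySem.Str.len sequence)) = sequence) = true :=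
    decide_eq_true ((pv_slice_iff v sequence s.length).mpr hpre)
  have hfil : ((s.length : Nat) : Int) ∈ (PySem.List.pyRange 0 (PySem.Str.len v - PySem.Str.len sequence + 1) 1).filter
      (fun i => decide (PySem.Str.slice v (some i) (some (i + PySem.Str.len sequence)) = sequence)) :=
    List.mem_filter.mpr ⟨hmem, hdec⟩
  have helem : ((s.length : Nat) : Int) + 0 + pos_init ∈ pvE sequence pos_init v := by
    rw [pvE]
    refine List.mem_flatMap.mpr ⟨((s.length : Nat) : Int), hfil, ?_⟩
    refine List.mem_map.mpr ⟨0, ?_, rfl⟩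
    rw [PySem.List.mem_pyRange_one, hlen]
    omega
  exact List.ne_nil_of_mem helem

-- ===== VERDICT (by name: the statement is the Claim_ definition above) =====
theorem hotspots_read_spec : Claim_unchanged_hotspots_read := by
  intro read sequence exons pos_init _ hnd
  show _ = _
  unfold hotspots_read hotspots_read_alt
  simp only
  rw [PySem.Dict.values_eq_map_keys (PySem.Dict.ofList read) (PySem.Dict.nodup_keys_ofList read) ""]
  have hhyp : ∀ v ∈ ((PySem.Dict.ofList read).keys.map (fun k => (PySem.Dict.ofList read).getD k "")).dropLast,
      pvE sequence pos_init v = [] := by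
    intro v hv
    by_cases hs : sequence = ""
    · subst hs; exact pv_E_empty_pat pos_init v
    · refine pv_E_no_infix sequence pos_init v ?_
      intro hinf
      exact hnd ⟨hs, ⟨v, by
        rw [PySem.Dict.values_eq_map_keys (PySem.Dict.ofList read) (PySem.Dict.nodup_keys_ofList read) ""]
        exact hv, hinf⟩⟩
  have h := pv_main sequence exons pos_init
      ((PySem.Dict.ofList read).keys.map (fun k => (PySem.Dict.ofList read).getD k "")) [] [] hhyp
  rw [List.foldl_map] at h
  exact h

theorem hotspots_read_changed : Claim_changed_hotspots_read := by
  unfold Claim_changed_hotspots_read; decide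

theorem hotspots_read_tight : Claim_exact_hotspots_read := by
  intro read sequence exons pos_init _ hD heq
  obtain ⟨hs, v, hvdl, hinf⟩ := hD
  have hA : hotspots_read read sequence exons pos_init
      = (((PySem.Dict.ofList read).values.foldl (pvAStep sequence exons pos_init) ([], [], [])).2.1,
         ((PySem.Dict.ofList read).values.foldl (pvAStep sequence exons pos_init) ([], [], [])).2.2) := by
    unfold hotspots_read
    simp only
    rw [PySem.Dict.values_eq_map_keys (PySem.Dict.ofList read) (PySem.Dict.nodup_keys_ofList read) "",
        List.foldl_map]
    rfl
  have hB : hotspots_read_alt read sequence exons pos_init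
      = (PySem.Dict.ofList read).values.foldl (pvBStep sequence exons pos_init) ([], []) := rfl
  rw [hA, hB] at heq
  have hstrict := pv_lenA_strict sequence exons pos_init (PySem.Dict.ofList read).values [] [] []
    ⟨v, hvdl, pv_E_ne sequence pos_init v hs hinf⟩
  have hlenB := pv_lenB sequence exons pos_init (PySem.Dict.ofList read).values [] []
  have hlen := congrArg pvLen2 heq
  simp only [pvLen2] at hstrict hlenB hlen
  omega
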